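-- pv_equiv track=rewrite | github.com/joachim-reichel/cgal | Testsuite/test/post_process_ctest_results.py | find_third_separator
-- ===== SOURCE A (Python) =====
-- def find_third_separator(contents):
--     separator_count = 0
--     for i, line in enumerate(contents):
--         if line.strip() == '------------------------------------------------------------------':
--             separator_count += 1
--             if separator_count == 3:
--                 return i - 2
--     return len(contents)
-- ===== SOURCE B (Python) =====
-- SEP = '------------------------------------------------------------------'
--
-- def _sep_after(contents, start):
--     """Index of the first separator line at position >= start, or None."""
--     for j in range(start, len(contents)):
--         if contents[j].strip() == SEP:
--             return j
--     return None
--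
-- def find_third_separator(contents):
--     first = _sep_after(contents, 0)
--     if first is None:
--         return len(contents)
--     second = _sep_after(contents, first + 1)
--     if second is None:
--         return len(contents)
--     third = _sep_after(contents, second + 1)
--     if third is None:
--         return len(contents)
--     return third - 2
-- ===== Notes on version B (the rewrite author's own statement) =====
-- stated objective: alternative
-- what changed: Replaces A's single scan with a running counter and inline early return by three staged next-occurrence searches through an option-returning helper chained with early returns.
import Mathlib
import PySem

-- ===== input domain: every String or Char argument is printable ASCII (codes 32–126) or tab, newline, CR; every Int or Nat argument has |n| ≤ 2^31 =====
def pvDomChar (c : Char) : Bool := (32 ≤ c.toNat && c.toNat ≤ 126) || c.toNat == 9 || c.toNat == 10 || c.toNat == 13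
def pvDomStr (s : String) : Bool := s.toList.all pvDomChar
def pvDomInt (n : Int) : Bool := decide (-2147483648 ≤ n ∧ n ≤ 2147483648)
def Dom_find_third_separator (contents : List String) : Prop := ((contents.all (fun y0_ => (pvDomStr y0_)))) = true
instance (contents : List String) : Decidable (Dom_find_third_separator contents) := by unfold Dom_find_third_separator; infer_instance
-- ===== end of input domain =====

-- B replaces A's single counting scan (running separator_count, inline early return)
-- by three staged next-occurrence searches through an option-returning helper
-- chained with early returns (objective: alternative decomposition, same cost).

def pvSep : String := "------------------------------------------------------------------"

-- ===== PORT A =====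
-- the for-loop with its running separator_count and early return; `total` is len(contents)
def find_third_separator_go : List String → Int → Nat → Int → Int
  | [], _, _, total => total
  | line :: rest, i, cnt, total =>
    if PySem.Str.strip line == pvSep then
      if cnt + 1 == 3 then i - 2
      else find_third_separator_go rest (i + 1) (cnt + 1) total
    else find_third_separator_go rest (i + 1) cnt total

def find_third_separator (contents : List String) : Int :=
  find_third_separator_go contents 0 0 (contents.length : Int)

-- ===== PORT B =====
-- _sep_after: scan indices j = start, start+1, … for the first separator line, or None
def sepAfter (contents : List String) (j : Nat) : Option Nat :=
  if h : j < contents.length then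
    if PySem.Str.strip contents[j] == pvSep then some j
    else sepAfter contents (j + 1)
  else none
termination_by contents.length - j

def find_third_separator_alt (contents : List String) : Int :=
  match sepAfter contents 0 with
  | none => (contents.length : Int)
  | some first =>
    match sepAfter contents (first + 1) with
    | none => (contents.length : Int)
    | some second =>
      match sepAfter contents (second + 1) with
      | none => (contents.length : Int)
      | some third => (third : Int) - 2

-- ===== PRECONDITION & SPEC =====
def Spec_find_third_separator (contents : List String) (out : Int) : Prop := out = find_third_separator_alt contents
instance (contents : List String) (out : Int) : Decidable (Spec_find_third_separator contents out) := by unfold Spec_find_third_separator; infer_instance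

-- ===== CLAIM (what is proved, stated in full; the proofs are below) =====
def Claim_equal_find_third_separator : Prop := ∀ (contents : List String), Dom_find_third_separator contents → Spec_find_third_separator contents (find_third_separator contents)

-- ===== LEMMAS AND PROOFS =====

theorem sepAfter_step (contents : List String) (j : Nat) :
    sepAfter contents j = if h : j < contents.length then
      (if PySem.Str.strip contents[j] == pvSep then some j else sepAfter contents (j + 1))
    else none := by
  rw [sepAfter.eq_def]

-- the chain of (3 - cnt) remaining next-occurrence searches, as one recursive function
def pvChain (contents : List String) (j : Nat) : Nat → Int → Int
  | 0, total => total
  | m + 1, total =>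
    match sepAfter contents j with
    | none => total
    | some f => if m = 0 then (f : Int) - 2 else pvChain contents (f + 1) m total

theorem go_chain (contents : List String) (j : Nat) (total : Int) (cnt : Nat) (hc : cnt < 3) :
    find_third_separator_go (contents.drop j) (j : Int) cnt total
      = pvChain contents j (3 - cnt) total := by
  obtain ⟨m, hm⟩ : ∃ m, 3 - cnt = m + 1 := ⟨2 - cnt, by omega⟩
  rw [hm]
  by_cases h : j < contents.length
  · rw [List.drop_eq_getElem_cons h]
    rw [pvChain, sepAfter_step]
    simp only [h, dif_pos]
    by_cases hs : (PySem.Str.strip contents[j] == pvSep) = true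
    · simp only [find_third_separator_go, hs, if_pos]
      by_cases h3 : cnt + 1 = 3
      · have : m = 0 := by omega
        subst this
        simp [h3]
      · have h3' : (cnt + 1 == 3) = false := by simp; omega
        rw [h3']
        simp only [Bool.false_eq_true, if_false]
        have hm' : (3 : Nat) - (cnt + 1) = m := by omega
        have := go_chain contents (j + 1) total (cnt + 1) (by omega)
        rw [hm'] at this
        have hcast : ((j : Int) + 1) = ((j + 1 : Nat) : Int) := by push_cast; ring
        rw [hcast, this]
        have hm0 : m ≠ 0 := by omega
        simp [hm0]
    · simp only [find_third_separator_go, hs, Bool.false_eq_true, if_false]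
      have := go_chain contents (j + 1) total cnt hc
      rw [hm] at this
      have hcast : ((j : Int) + 1) = ((j + 1 : Nat) : Int) := by push_cast; ring
      rw [hcast, this, pvChain]
  · have hd : contents.drop j = [] := List.drop_eq_nil_of_le (by omega)
    rw [hd]
    simp [find_third_separator_go, pvChain, sepAfter_step, h]
termination_by contents.length - j
decreasing_by all_goals omega

theorem alt_chain (contents : List String) :
    find_third_separator_alt contents = pvChain contents 0 3 (contents.length : Int) := by
  unfold find_third_separator_alt
  rw [pvChain]
  cases h0 : sepAfter contents 0 with
  | none => rfl
  | some f =>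
    simp only
    rw [if_neg (by omega), pvChain]
    cases h1 : sepAfter contents (f + 1) with
    | none => rfl
    | some s =>
      simp only
      rw [if_neg (by omega), pvChain]
      cases h2 : sepAfter contents (s + 1) with
      | none => rfl
      | some t => simp

-- ===== VERDICT (by name: the statement is the Claim_ definition above) =====
theorem find_third_separator_spec : Claim_equal_find_third_separator := by
  intro contents _
  unfold Spec_find_third_separator find_third_separator
  rw [alt_chain]
  have := go_chain contents 0 (contents.length : Int) 0 (by omega)
  simpa using this
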